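-- pv_equiv track=rewrite | github.com/PeopleAndService/AlgorithmStudy | jaeseuk/pypython/Programmers/level2/더 맵게.py | solution
-- ===== SOURCE A (Python) =====
-- import heapq
--
-- def solution(scoville, K):
--     heapq.heapify(scoville)
--     answer = 0
--
--     while len(scoville) >= 2 and scoville[0] < K:
--         first = heapq.heappop(scoville)
--         second = heapq.heappop(scoville)
--         new = first + second * 2
--         heapq.heappush(scoville, new)
--         answer += 1
--
--     return answer if scoville[0] >= K else -1
-- ===== SOURCE B (Python) =====
-- def _insort(a, x):
--     # linear ordered insertion: insert x before the first element >= x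
--     i = 0
--     while i < len(a) and a[i] < x:
--         i += 1
--     a.insert(i, x)
--
--
-- def solution(scoville, K):
--     pool = sorted(scoville)
--     answer = 0
--     while len(pool) >= 2 and pool[0] < K:
--         first, second = pool[0], pool[1]
--         pool = pool[2:]
--         _insort(pool, first + second * 2)
--         answer += 1
--     return answer if pool[0] >= K else -1
-- ===== Notes on version B (the rewrite author's own statement) =====
-- stated objective: alternative
-- what changed: Replaces the binary heap (heapify/heappop/heappush) with a sort-once sorted list: the two smallest are always the first two elements and each mixed value is re-inserted by ordered insertion.
import Mathlib
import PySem

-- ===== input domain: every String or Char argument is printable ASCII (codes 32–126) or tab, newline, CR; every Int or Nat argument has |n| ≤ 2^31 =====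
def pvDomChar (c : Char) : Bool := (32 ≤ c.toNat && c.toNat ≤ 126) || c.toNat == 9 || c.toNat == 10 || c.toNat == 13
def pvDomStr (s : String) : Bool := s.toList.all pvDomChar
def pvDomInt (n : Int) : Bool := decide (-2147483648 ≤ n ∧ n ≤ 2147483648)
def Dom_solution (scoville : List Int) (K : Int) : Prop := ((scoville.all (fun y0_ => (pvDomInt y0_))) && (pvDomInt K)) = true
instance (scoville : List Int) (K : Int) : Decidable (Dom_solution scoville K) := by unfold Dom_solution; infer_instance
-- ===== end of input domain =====

-- B replaces A's binary heap by a sort-once sorted list with ordered re-insertion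
-- (objective: alternative decomposition, same return value). A mutates its argument
-- (heapify/heappop in place) while B does not; the equivalence proved is about the
-- RETURN value only. Pre_ excludes the empty list, on which A raises IndexError.

-- ===== PORT A =====
-- A's heapq calls are ported as a functional min-heap (skew heap): heapify builds it
-- by repeated push, heappop reads the root and merges the children, heappush merges a
-- singleton; the popped VALUES (all that A's return value uses) agree with heapq's.
inductive PvHeap where
  | nil : PvHeap
  | node : Int → PvHeap → PvHeap → PvHeap

def pvHeapSize : PvHeap → Nat
  | .nil => 0
  | .node _ l r => (pvHeapSize l) + (pvHeapSize r) + 1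

theorem pvMergeDec1 (x : Int) (l r b : PvHeap) :
    (pvHeapSize r) + (pvHeapSize b) < (pvHeapSize (PvHeap.node x l r)) + (pvHeapSize b) := by
  simp only [pvHeapSize]; omega

theorem pvMergeDec2 (x : Int) (l r : PvHeap) (y : Int) (l' r' : PvHeap) :
    (pvHeapSize r') + (pvHeapSize (PvHeap.node x l r)) < (pvHeapSize (PvHeap.node x l r)) + (pvHeapSize (PvHeap.node y l' r')) := by
  simp only [pvHeapSize]; omega

def pvHeapMerge : PvHeap → PvHeap → PvHeap
  | .nil, t => t
  | t, .nil => t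
  | .node x l r, .node y l' r' =>
    if x ≤ y then .node x (pvHeapMerge r (.node y l' r')) l
    else .node y (pvHeapMerge r' (.node x l r)) l'
termination_by a b => (pvHeapSize a) + (pvHeapSize b)
decreasing_by
  · exact pvMergeDec1 x l r _
  · exact pvMergeDec2 x l r y l' r'

def pvHeapPush (h : PvHeap) (x : Int) : PvHeap := (pvHeapMerge h) (.node x .nil .nil)

-- scoville[0] of a heapified list = the root
def pvHeapRoot : PvHeap → Option Int
  | .nil => none
  | .node x _ _ => some x

-- the heap left after heappop
def pvHeapRest : PvHeap → PvHeap
  | .nil => .nil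
  | .node _ l r => (pvHeapMerge l) r

def pvHeapify (l : List Int) : PvHeap := l.foldl pvHeapPush .nil

theorem pvHeapSizeMerge (a b : PvHeap) : (pvHeapSize ((pvHeapMerge a) b)) = (pvHeapSize a) + (pvHeapSize b) := by
  induction a, b using pvHeapMerge.induct with
  | case1 t => simp [pvHeapMerge, pvHeapSize]
  | case2 t h => cases t <;> simp [pvHeapMerge, pvHeapSize]
  | case3 x l r y l' r' hxy ih => simp [pvHeapMerge, hxy, pvHeapSize, ih]; omega
  | case4 x l r y l' r' hxy ih => simp [pvHeapMerge, hxy, pvHeapSize, ih]; omega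

theorem pvHeapSizeRest (h : PvHeap) (r : Int) (hr : (pvHeapRoot h) = some r) :
    (pvHeapSize (pvHeapRest h)) + 1 = (pvHeapSize h) := by
  cases h with
  | nil => simp [pvHeapRoot] at hr
  | node x l rr => simp [pvHeapRest, pvHeapSize, pvHeapSizeMerge]

theorem pvSolDec (h : PvHeap) (f s v : Int) (h1 : (pvHeapRoot h) = some f)
    (h2 : (pvHeapRoot (pvHeapRest h)) = some s) :
    (pvHeapSize (pvHeapPush (pvHeapRest (pvHeapRest h)) v)) < (pvHeapSize h) := by
  have e1 := pvHeapSizeRest h f h1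
  have e2 := pvHeapSizeRest (pvHeapRest h) s h2
  simp only [pvHeapPush, pvHeapSizeMerge, pvHeapSize]
  omega

-- the while-loop of A: pop two smallest, push first + second*2, count
def pvSolLoop (K : Int) (h : PvHeap) (answer : Int) : Int :=
  match hroot : (pvHeapRoot h) with
  | none => -1          -- empty heap: Python's final scoville[0] raises; outside Pre_
  | some first =>
    if 2 ≤ (pvHeapSize h) ∧ first < K then
      match hroot2 : (pvHeapRoot (pvHeapRest h)) with
      | none => -1      -- unreachable when 2 ≤ (pvHeapSize h)
      | some second =>
        pvSolLoop K (pvHeapPush (pvHeapRest (pvHeapRest h)) (first + second * 2)) (answer + 1)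
    else if first ≥ K then answer else -1
termination_by (pvHeapSize h)
decreasing_by exact pvSolDec h first second _ hroot hroot2

def solution (scoville : List Int) (K : Int) : Int :=
  pvSolLoop K (pvHeapify scoville) 0

-- ===== PORT B =====
-- _insort: linear ordered insertion, x goes before the first element ≥ x
def pvInsort (a : List Int) (x : Int) : List Int :=
  match a with
  | [] => [x]
  | y :: t => if y < x then y :: pvInsort t x else x :: y :: t

theorem pvInsort_length (a : List Int) (x : Int) :
    (pvInsort a x).length = a.length + 1 := by
  induction a with
  | nil => simp [pvInsort]
  | cons y t ih => simp only [pvInsort]; split <;> simp [ih]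

theorem pvAltDec (t : List Int) (v x y : Int) :
    (pvInsort t v).length < (x :: y :: t).length := by
  simp [pvInsort_length]

-- the while-loop of B over the sorted pool
def pvAltLoop (K : Int) (a : List Int) (answer : Int) : Int :=
  match a with
  | [] => -1            -- empty pool: Python's final pool[0] raises; outside Pre_
  | [x] => if x ≥ K then answer else -1
  | x :: y :: t =>
    if x < K then pvAltLoop K (pvInsort t (x + y * 2)) (answer + 1)
    else if x ≥ K then answer else -1
termination_by a.length
decreasing_by exact pvAltDec t _ x y

def solution_alt (scoville : List Int) (K : Int) : Int :=
  pvAltLoop K (PySem.List.sorted scoville (fun x => x) false) 0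

-- ===== PRECONDITION & SPEC =====
-- Pre_ excludes exactly the empty list, on which A raises IndexError at scoville[0].
def Pre_solution (scoville : List Int) (K : Int) : Prop := scoville ≠ []
instance (scoville : List Int) (K : Int) : Decidable (Pre_solution scoville K) := by unfold Pre_solution; infer_instance
def pvWitness_solution : List Int × Int := ([1, 2, 3, 9, 10, 12], 7)

def Spec_solution (scoville : List Int) (K : Int) (out : Int) : Prop := out = solution_alt scoville K
instance (scoville : List Int) (K : Int) (out : Int) : Decidable (Spec_solution scoville K out) := by unfold Spec_solution; infer_instance

-- ===== CLAIM (what is proved, stated in full; the proofs are below) =====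
def Claim_equal_solution : Prop := ∀ (scoville : List Int) (K : Int), Dom_solution scoville K → Pre_solution scoville K → Spec_solution scoville K (solution scoville K)

-- ===== LEMMAS AND PROOFS =====

def pvHeapMS : PvHeap → Multiset Int
  | .nil => 0
  | .node x l r => x ::ₘ ((pvHeapMS l) + (pvHeapMS r))

def PvIsHeap : PvHeap → Prop
  | .nil => True
  | .node x l r => (∀ y ∈ (pvHeapMS l), x ≤ y) ∧ (∀ y ∈ (pvHeapMS r), x ≤ y) ∧ (PvIsHeap l) ∧ (PvIsHeap r)

theorem pvHeapMsMerge (a b : PvHeap) : (pvHeapMS ((pvHeapMerge a) b)) = (pvHeapMS a) + (pvHeapMS b) := by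
  induction a, b using pvHeapMerge.induct with
  | case1 t => simp [pvHeapMerge, pvHeapMS]
  | case2 t h => cases t <;> simp [pvHeapMerge, pvHeapMS]
  | case3 x l r y l' r' hxy ih =>
    simp only [pvHeapMerge, hxy, if_true, pvHeapMS, ih]
    simp only [← Multiset.singleton_add]
    abel
  | case4 x l r y l' r' hxy ih =>
    simp only [pvHeapMerge, hxy, if_false, pvHeapMS, ih]
    simp only [← Multiset.singleton_add]
    abel

theorem pvIsHeapMerge (a b : PvHeap) (ha : (PvIsHeap a)) (hb : (PvIsHeap b)) :
    (PvIsHeap ((pvHeapMerge a) b)) := by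
  induction a, b using pvHeapMerge.induct with
  | case1 t => simpa [pvHeapMerge]
  | case2 t h => cases t <;> simp_all [pvHeapMerge]
  | case3 x l r y l' r' hxy ih =>
    obtain ⟨hl, hr, hhl, hhr⟩ := ha
    simp only [pvHeapMerge, hxy, if_true, PvIsHeap]
    refine ⟨?_, hl, ih hhr hb, hhl⟩
    intro z hz
    rw [pvHeapMsMerge] at hz
    rcases Multiset.mem_add.mp hz with h1 | h1
    · exact hr z h1
    · simp only [pvHeapMS, Multiset.mem_cons] at h1
      rcases h1 with h1 | h1
      · omega
      · obtain ⟨hl', hr', _, _⟩ := hb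
        rcases Multiset.mem_add.mp h1 with h2 | h2
        · exact le_trans hxy (hl' z h2)
        · exact le_trans hxy (hr' z h2)
  | case4 x l r y l' r' hxy ih =>
    obtain ⟨hl', hr', hhl', hhr'⟩ := hb
    simp only [pvHeapMerge, hxy, if_false, PvIsHeap]
    refine ⟨?_, hl', ih hhr' ha, hhl'⟩
    intro z hz
    rw [pvHeapMsMerge] at hz
    rcases Multiset.mem_add.mp hz with h1 | h1
    · exact hr' z h1
    · simp only [pvHeapMS, Multiset.mem_cons] at h1
      rcases h1 with h1 | h1
      · omega
      · obtain ⟨hl, hr, _, _⟩ := ha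
        rcases Multiset.mem_add.mp h1 with h2 | h2
        · exact le_trans (by omega) (hl z h2)
        · exact le_trans (by omega) (hr z h2)

theorem pvIsHeapPush (h : PvHeap) (x : Int) (hh : (PvIsHeap h)) : (PvIsHeap ((pvHeapPush h) x)) :=
  pvIsHeapMerge h _ hh (by simp [PvIsHeap, pvHeapMS])

theorem pvHeapMsPush (h : PvHeap) (x : Int) : (pvHeapMS ((pvHeapPush h) x)) = x ::ₘ (pvHeapMS h) := by
  simp [pvHeapPush, pvHeapMsMerge, pvHeapMS]
  rw [Multiset.add_comm]
  rfl

theorem pvHeapify_ms (l : List Int) : (pvHeapMS (pvHeapify l)) = ↑l := by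
  have key : ∀ (l : List Int) (h : PvHeap), (pvHeapMS (l.foldl pvHeapPush h)) = (pvHeapMS h) + ↑l := by
    intro l
    induction l with
    | nil => intro h; simp
    | cons x t ih =>
      intro h
      simp only [List.foldl_cons, ih, pvHeapMsPush]
      simp only [← Multiset.cons_coe, ← Multiset.singleton_add]
      abel
  simpa [pvHeapify, pvHeapMS] using key l .nil

theorem pvHeapify_isHeap (l : List Int) : (PvIsHeap (pvHeapify l)) := by
  have key : ∀ (l : List Int) (h : PvHeap), (PvIsHeap h) → (PvIsHeap (l.foldl pvHeapPush h)) := by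
    intro l
    induction l with
    | nil => intro h hh; simpa
    | cons x t ih => intro h hh; exact ih _ (pvIsHeapPush h x hh)
  exact key l .nil trivial

theorem pvHeapRootRest (h : PvHeap) (r : Int) (hr : (pvHeapRoot h) = some r) :
    (pvHeapMS h) = r ::ₘ (pvHeapMS (pvHeapRest h)) := by
  cases h with
  | nil => simp [pvHeapRoot] at hr
  | node x l rr =>
    simp only [pvHeapRoot, Option.some.injEq] at hr
    subst hr
    simp [pvHeapMS, pvHeapRest, pvHeapMsMerge]

theorem pvHeapRootMin (h : PvHeap) (r : Int) (hh : (PvIsHeap h)) (hr : (pvHeapRoot h) = some r) :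
    ∀ y ∈ (pvHeapMS h), r ≤ y := by
  cases h with
  | nil => simp [pvHeapRoot] at hr
  | node x l rr =>
    simp only [pvHeapRoot, Option.some.injEq] at hr
    subst hr
    obtain ⟨hl, hrr, _, _⟩ := hh
    intro y hy
    simp only [pvHeapMS, Multiset.mem_cons] at hy
    rcases hy with hy | hy
    · omega
    · rcases Multiset.mem_add.mp hy with h1 | h1
      · exact hl y h1
      · exact hrr y h1

theorem pvHeapSizeCard (h : PvHeap) : (pvHeapSize h) = Multiset.card (pvHeapMS h) := by
  induction h with
  | nil => simp [pvHeapSize, pvHeapMS]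
  | node x l r ihl ihr => simp [pvHeapSize, pvHeapMS, ihl, ihr]

theorem pvIsHeapRest (h : PvHeap) (hh : (PvIsHeap h)) : (PvIsHeap (pvHeapRest h)) := by
  cases h with
  | nil => trivial
  | node x l r =>
    obtain ⟨_, _, hl, hr⟩ := hh
    exact pvIsHeapMerge l r hl hr

theorem pvInsort_perm (a : List Int) (x : Int) : (pvInsort a x).Perm (x :: a) := by
  induction a with
  | nil => simp [pvInsort]
  | cons y t ih =>
    simp only [pvInsort]
    split
    · exact (List.Perm.cons y ih).trans (List.Perm.swap x y t)
    · exact List.Perm.refl _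

theorem pvInsort_sorted (a : List Int) (x : Int) (ha : a.Pairwise (· ≤ ·)) :
    (pvInsort a x).Pairwise (· ≤ ·) := by
  induction a with
  | nil => simp [pvInsort]
  | cons y t ih =>
    rw [List.pairwise_cons] at ha
    obtain ⟨hy, ht⟩ := ha
    simp only [pvInsort]
    split
    · rename_i hyx
      rw [List.pairwise_cons]
      refine ⟨?_, ih ht⟩
      intro z hz
      have hmem := (pvInsort_perm t x).mem_iff.mp hz
      rcases List.mem_cons.mp hmem with h1 | h1
      · subst h1; omega
      · exact hy z h1
    · rename_i hyx
      rw [List.pairwise_cons]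
      refine ⟨?_, List.pairwise_cons.mpr ⟨hy, ht⟩⟩
      intro z hz
      rcases List.mem_cons.mp hz with h1 | h1
      · omega
      · have := hy z h1; omega

-- head of a sorted nonempty list is a lower bound
theorem sorted_head_min (x : Int) (t : List Int) (h : (x :: t).Pairwise (· ≤ ·)) :
    ∀ y ∈ (↑(x :: t) : Multiset Int), x ≤ y := by
  intro y hy
  rw [Multiset.mem_coe, List.mem_cons] at hy
  rcases hy with hy | hy
  · omega
  · exact (List.pairwise_cons.mp h).1 y hy

-- the main simulation: same multiset + heap property + sortedness ⇒ same loop result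
theorem loop_eq (K : Int) (n : Nat) :
    ∀ (h : PvHeap) (a : List Int) (ans : Int),
      a.length = n → (PvIsHeap h) → (pvHeapMS h) = ↑a → a.Pairwise (· ≤ ·) →
      pvSolLoop K h ans = pvAltLoop K a ans := by
  induction n using Nat.strong_induction_on with
  | _ n ih =>
    intro h a ans hlen hh hms hsort
    subst hlen
    have hsize : (pvHeapSize h) = a.length := by rw [pvHeapSizeCard, hms]; simp
    rw [pvSolLoop]
    split
    · -- A's heap is empty, so a is [] and both sides give -1
      rename_i hroot
      have hnil : h = .nil := by
        cases h with
        | nil => rfl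
        | node z l r => simp [pvHeapRoot] at hroot
      subst hnil
      have ha : a = [] := by
        have h0 : (↑a : Multiset Int) = 0 := by rw [← hms]; rfl
        simpa using h0
      subst ha
      rw [pvAltLoop]
    · rename_i r hroot
      obtain ⟨x, t, rfl⟩ : ∃ x t, a = x :: t := by
        cases a with
        | nil =>
          exfalso
          cases h with
          | nil => simp [pvHeapRoot] at hroot
          | node z l rr => simp [pvHeapMS] at hms
        | cons x t => exact ⟨x, t, rfl⟩
      -- the heap root and the sorted head are both the minimum of the common multiset
      have hrx : r = x := by
        have h1 : r ∈ (pvHeapMS h) := by rw [pvHeapRootRest h r hroot]; simp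
        have h2 : x ≤ r := sorted_head_min x t hsort r (by rwa [← hms])
        have h3 : r ≤ x := pvHeapRootMin h r hh hroot x (by rw [hms]; simp)
        omega
      subst hrx
      split
      · rename_i hguard
        obtain ⟨y, t', rfl⟩ : ∃ y t', t = y :: t' := by
          cases t with
          | nil => exfalso; rw [hsize] at hguard; simp at hguard
          | cons y t' => exact ⟨y, t', rfl⟩
        have hms1 : (pvHeapMS (pvHeapRest h)) = ↑(y :: t') := by
          have h0 := pvHeapRootRest h r hroot
          rw [hms] at h0
          have h0' : r ::ₘ (pvHeapMS (pvHeapRest h)) = r ::ₘ (↑(y :: t') : Multiset Int) := by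
            rw [← h0, ← Multiset.cons_coe]
          exact (Multiset.cons_inj_right _).mp h0'
        have hh1 : (PvIsHeap (pvHeapRest h)) := pvIsHeapRest h hh
        have hsort1 : (y :: t').Pairwise (· ≤ ·) := (List.pairwise_cons.mp hsort).2
        split
        · -- second pop from an empty rest: impossible, rest holds y :: t'
          rename_i hroot2
          exfalso
          have hrnil : (pvHeapRest h) = .nil := by
            cases hr2 : (pvHeapRest h) with
            | nil => rfl
            | node z l rr => rw [hr2] at hroot2; simp [pvHeapRoot] at hroot2
          rw [hrnil] at hms1
          have h0 := hms1.symm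
          simp only [pvHeapMS] at h0
          rw [Multiset.coe_eq_zero] at h0
          simp at h0
        · rename_i s hroot2
          have hsy : s = y := by
            have h1 : s ∈ (pvHeapMS (pvHeapRest h)) := by rw [pvHeapRootRest _ s hroot2]; simp
            have h2 : y ≤ s := sorted_head_min y t' hsort1 s (by rwa [← hms1])
            have h3 : s ≤ y := pvHeapRootMin _ s hh1 hroot2 y (by rw [hms1]; simp)
            omega
          subst hsy
          have hms2 : pvHeapMS (pvHeapRest (pvHeapRest h)) = ↑t' := by
            have h0 := pvHeapRootRest (pvHeapRest h) s hroot2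
            rw [hms1] at h0
            have h0' : s ::ₘ pvHeapMS (pvHeapRest (pvHeapRest h)) = s ::ₘ (↑t' : Multiset Int) := by
              rw [← h0, ← Multiset.cons_coe]
            exact (Multiset.cons_inj_right _).mp h0'
          rw [pvAltLoop]
          simp only [if_pos hguard.2]
          refine ih ((pvInsort t' (r + s * 2)).length) ?_ _ _ (ans + 1) rfl ?_ ?_ ?_
          · rw [pvInsort_length]; simp
          · exact pvIsHeapPush _ _ (pvIsHeapRest _ hh1)
          · rw [pvHeapMsPush, hms2, Multiset.cons_coe, Multiset.coe_eq_coe]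
            exact (pvInsort_perm _ _).symm
          · exact pvInsort_sorted _ _ (List.pairwise_cons.mp hsort1).2
      · rename_i hguard
        cases t with
        | nil => rw [pvAltLoop]
        | cons y t' =>
          rw [pvAltLoop]
          have hxK : ¬ r < K := by
            rw [hsize] at hguard
            simp at hguard
            omega
          simp only [if_neg hxK]

-- ===== VERDICT (by name: the statement is the Claim_ definition above) =====
theorem solution_spec : Claim_equal_solution := by
  intro scoville K _ _
  unfold Spec_solution solution solution_alt
  exact loop_eq K (PySem.List.sorted scoville (fun x => x) false).length
    (pvHeapify scoville) _ 0 rfl (pvHeapify_isHeap scoville)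
    (by rw [pvHeapify_ms, Multiset.coe_eq_coe]; exact (PySem.List.sorted_perm ..).symm)
    (by simpa using PySem.List.sorted_pairwise scoville (fun x => x))
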